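-- pv_equiv track=rewrite | github.com/Owen-Richards/ai-nutritionist | dev-tools/scripts/seed_database.py | _get_ingredient_category
-- ===== SOURCE A (Python) =====
-- def _get_ingredient_category(ingredient_name: str) -> str:
--     """Get category for grocery ingredient"""
--     categories = {
--         "produce": ["sweet potato", "spinach", "asparagus", "broccoli", "bell peppers", "carrots", "lemon", "garlic"],
--         "proteins": ["salmon fillet", "chickpeas"],
--         "grains": ["quinoa", "brown rice"],
--         "pantry": ["tahini", "olive oil", "soy sauce", "sesame oil"],
--         "other": []
--     }
--
--     for category, items in categories.items():
--         if ingredient_name.lower() in items: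
--             return category
--     return "other"
-- ===== SOURCE B (Python) =====
-- # Sorted table of (ingredient, category), searched with hand-written binary search (bisect_left).
-- _TABLE = [  # kept sorted by ingredient name
--     ("asparagus", "produce"),
--     ("bell peppers", "produce"),
--     ("broccoli", "produce"),
--     ("brown rice", "grains"),
--     ("carrots", "produce"),
--     ("chickpeas", "proteins"),
--     ("garlic", "produce"),
--     ("lemon", "produce"),
--     ("olive oil", "pantry"),
--     ("quinoa", "grains"),
--     ("salmon fillet", "proteins"),
--     ("sesame oil", "pantry"),
--     ("soy sauce", "pantry"),
--     ("spinach", "produce"),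
--     ("sweet potato", "produce"),
--     ("tahini", "pantry"),
-- ]
--
--
-- def _get_ingredient_category(ingredient_name: str) -> str:
--     """Get category for grocery ingredient"""
--     key = ingredient_name.lower()
--     lo, hi = 0, len(_TABLE)
--     while lo < hi:  # bisect_left on the sorted names
--         mid = (lo + hi) // 2
--         if _TABLE[mid][0] < key:
--             lo = mid + 1
--         else:
--             hi = mid
--     if lo < len(_TABLE) and _TABLE[lo][0] == key:
--         return _TABLE[lo][1]
--     return "other"
-- ===== Notes on version B (the rewrite author's own statement) =====
-- stated objective: alternative
-- what changed: Replaces A's linear scan over a dict of category->item lists with binary search (hand-written bisect_left) over a single sorted list of (ingredient, category) pairs.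
import Mathlib
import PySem

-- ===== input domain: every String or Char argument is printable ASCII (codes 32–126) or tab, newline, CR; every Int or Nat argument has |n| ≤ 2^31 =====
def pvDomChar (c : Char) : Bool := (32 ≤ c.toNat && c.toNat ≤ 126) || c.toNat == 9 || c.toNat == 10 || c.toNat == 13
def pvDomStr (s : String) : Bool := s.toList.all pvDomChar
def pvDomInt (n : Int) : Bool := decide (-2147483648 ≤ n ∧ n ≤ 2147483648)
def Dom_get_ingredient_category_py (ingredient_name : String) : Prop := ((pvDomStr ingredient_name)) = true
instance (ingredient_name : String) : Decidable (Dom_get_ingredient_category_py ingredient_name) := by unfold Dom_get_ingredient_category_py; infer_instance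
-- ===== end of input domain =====

-- B replaces A's per-call linear scan over a dict of category->item lists with binary search (hand-written bisect_left) over one sorted (ingredient, category) table; same values.


-- ===== PORT A =====
-- the literal `categories` dict, as an insertion-ordered items list
def pvCategoriesA : List (String × List String) :=
  [("produce", ["sweet potato", "spinach", "asparagus", "broccoli", "bell peppers", "carrots", "lemon", "garlic"]),
   ("proteins", ["salmon fillet", "chickpeas"]),
   ("grains", ["quinoa", "brown rice"]),
   ("pantry", ["tahini", "olive oil", "soy sauce", "sesame oil"]),
   ("other", [])]

-- the `for category, items in categories.items(): if … return category` loop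
def pvScanA (t : String) : List (String × List String) → String
  | [] => "other"
  | (category, items) :: rest => if items.contains t then category else pvScanA t rest

def get_ingredient_category_py (ingredient_name : String) : String :=
  pvScanA (PySem.Str.lower ingredient_name) pvCategoriesA

-- ===== PORT B =====
-- _TABLE: the sorted (ingredient, category) list of Source B
def pvTableB : List (String × String) :=
  [("asparagus", "produce"), ("bell peppers", "produce"), ("broccoli", "produce"),
   ("brown rice", "grains"), ("carrots", "produce"), ("chickpeas", "proteins"),
   ("garlic", "produce"), ("lemon", "produce"), ("olive oil", "pantry"),
   ("quinoa", "grains"), ("salmon fillet", "proteins"), ("sesame oil", "pantry"),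
   ("soy sauce", "pantry"), ("spinach", "produce"), ("sweet potato", "produce"),
   ("tahini", "pantry")]

-- the bisect_left while-loop of Source B, with a fuel counter only to make the same
-- computation structurally total (each step shrinks hi - lo, so fuel = hi - lo at the
-- call site is always enough and the fuel never runs out); lo, hi stay in
-- 0..len(_TABLE) so _TABLE[mid] is always in range (getD's default is never used);
-- Python str '<' is PySem.Chars.strLt on the code points (PYSEM.md)
def pvBisectB (key : String) : Nat → Nat → Nat → Nat
  | 0, lo, _ => lo
  | fuel + 1, lo, hi =>
    if lo < hi then
      let mid := (lo + hi) / 2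
      if (PySem.Chars.strLt (pvTableB.getD mid ("", "")).1.toList key.toList) then pvBisectB key fuel (mid + 1) hi
      else pvBisectB key fuel lo mid
    else lo

def get_ingredient_category_py_alt (ingredient_name : String) : String :=
  let key := PySem.Str.lower ingredient_name
  let lo := pvBisectB key pvTableB.length 0 pvTableB.length
  if lo < pvTableB.length then
    let p := pvTableB.getD lo ("", "")
    if p.1 == key then p.2 else "other"
  else "other"

-- ===== PRECONDITION & SPEC =====
def Spec_get_ingredient_category_py (ingredient_name : String) (out : String) : Prop := out = get_ingredient_category_py_alt ingredient_name
instance (ingredient_name : String) (out : String) : Decidable (Spec_get_ingredient_category_py ingredient_name out) := by unfold Spec_get_ingredient_category_py; infer_instance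

-- ===== CLAIM (what is proved, stated in full; the proofs are below) =====
def Claim_equal_get_ingredient_category_py : Prop := ∀ (ingredient_name : String), Dom_get_ingredient_category_py ingredient_name → Spec_get_ingredient_category_py ingredient_name (get_ingredient_category_py ingredient_name)

-- ===== LEMMAS AND PROOFS =====
lemma pvBisectB_le (key : String) (fuel : Nat) : ∀ (lo hi : Nat), lo ≤ hi → pvBisectB key fuel lo hi ≤ hi := by
  induction fuel with
  | zero => intro lo hi h; simpa [pvBisectB] using h
  | succ n ih =>
    intro lo hi h
    simp only [pvBisectB]
    split_ifs with h1 h2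
    · exact ih _ _ (by omega)
    · exact le_trans (ih _ _ (by omega)) (by omega)
    · exact h

lemma pv_core_eq (t : String) :
    pvScanA t pvCategoriesA =
      (if pvBisectB t pvTableB.length 0 pvTableB.length < pvTableB.length then
        (if (pvTableB.getD (pvBisectB t pvTableB.length 0 pvTableB.length) ("", "")).1 == t then
          (pvTableB.getD (pvBisectB t pvTableB.length 0 pvTableB.length) ("", "")).2 else "other")
      else "other") := by
  by_cases h0 : t = "sweet potato"
  · subst h0; decide
  by_cases h1 : t = "spinach"
  · subst h1; decide
  by_cases h2 : t = "asparagus"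
  · subst h2; decide
  by_cases h3 : t = "broccoli"
  · subst h3; decide
  by_cases h4 : t = "bell peppers"
  · subst h4; decide
  by_cases h5 : t = "carrots"
  · subst h5; decide
  by_cases h6 : t = "lemon"
  · subst h6; decide
  by_cases h7 : t = "garlic"
  · subst h7; decide
  by_cases h8 : t = "salmon fillet"
  · subst h8; decide
  by_cases h9 : t = "chickpeas"
  · subst h9; decide
  by_cases h10 : t = "quinoa"
  · subst h10; decide
  by_cases h11 : t = "brown rice"
  · subst h11; decide
  by_cases h12 : t = "tahini"
  · subst h12; decide
  by_cases h13 : t = "olive oil"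
  · subst h13; decide
  by_cases h14 : t = "soy sauce"
  · subst h14; decide
  by_cases h15 : t = "sesame oil"
  · subst h15; decide
  -- t is none of the 16 ingredients: A's scan returns "other", and whatever index
  -- the binary search lands on, the name stored there is one of the 16, hence ≠ t.
  have hA : pvScanA t pvCategoriesA = "other" := by
    have e0 : (t == "sweet potato") = false := by simp [h0]
    have e1 : (t == "spinach") = false := by simp [h1]
    have e2 : (t == "asparagus") = false := by simp [h2]
    have e3 : (t == "broccoli") = false := by simp [h3]
    have e4 : (t == "bell peppers") = false := by simp [h4]
    have e5 : (t == "carrots") = false := by simp [h5]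
    have e6 : (t == "lemon") = false := by simp [h6]
    have e7 : (t == "garlic") = false := by simp [h7]
    have e8 : (t == "salmon fillet") = false := by simp [h8]
    have e9 : (t == "chickpeas") = false := by simp [h9]
    have e10 : (t == "quinoa") = false := by simp [h10]
    have e11 : (t == "brown rice") = false := by simp [h11]
    have e12 : (t == "tahini") = false := by simp [h12]
    have e13 : (t == "olive oil") = false := by simp [h13]
    have e14 : (t == "soy sauce") = false := by simp [h14]
    have e15 : (t == "sesame oil") = false := by simp [h15]
    simp only [pvCategoriesA, pvScanA, List.contains, List.elem_cons, List.elem_nil]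
    simp [e0, e1, e2, e3, e4, e5, e6, e7, e8, e9, e10, e11, e12, e13, e14, e15]
  rw [hA]
  have hr : pvBisectB t pvTableB.length 0 pvTableB.length ≤ 16 := by
    simpa [pvTableB] using pvBisectB_le t pvTableB.length 0 pvTableB.length (by simp [pvTableB])
  set r := pvBisectB t pvTableB.length 0 pvTableB.length with hrdef
  clear_value r
  interval_cases r <;>
    simp [pvTableB, h0, h1, h2, h3, h4, h5, h6, h7, h8, h9, h10, h11, h12, h13, h14, h15,
      Ne.symm h0, Ne.symm h1, Ne.symm h2, Ne.symm h3, Ne.symm h4, Ne.symm h5, Ne.symm h6,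
      Ne.symm h7, Ne.symm h8, Ne.symm h9, Ne.symm h10, Ne.symm h11, Ne.symm h12,
      Ne.symm h13, Ne.symm h14, Ne.symm h15]

-- ===== VERDICT (by name: the statement is the Claim_ definition above) =====
theorem get_ingredient_category_py_spec : Claim_equal_get_ingredient_category_py := by
  intro s _
  unfold Spec_get_ingredient_category_py get_ingredient_category_py get_ingredient_category_py_alt
  exact pv_core_eq _
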